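-- pv_equiv track=rewrite | github.com/brmulliner/traffic-jams | Traffic_Flow.py | avoid_crash
-- ===== SOURCE A (Python) =====
-- def avoid_crash(x):
--     for i in range(len(x)):
--         if x[i] != -1:
--             xv = int(x[i])
--             for j in range(1,xv+1):
--                 if i+j < len(x):
--                     if x[i+j] != -1:
--                         xv = j-1
--                         break
--                 else:
--                     if x[i+j-len(x)] != -1:
--                         xv = j-1
--                         break
--             x[i] = xv
--     return x
-- ===== SOURCE B (Python) =====
-- def avoid_crash(x):
--     n = len(x)
--     dist = [0] * n
--     c = None
--     # one backward sweep over the doubled index range: c counts steps to the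
--     # nearest occupied cell strictly ahead (cyclically)
--     for k in range(2 * n - 1, -1, -1):
--         i = k % n
--         if c is not None:
--             dist[i] = c
--         c = 1 if x[i] != -1 else (None if c is None else c + 1)
--     for i in range(n):
--         if x[i] != -1:
--             x[i] = min(x[i], dist[i] - 1)
--     return x
-- ===== Notes on version B (the rewrite author's own statement) =====
-- stated objective: alternative
-- what changed: Replaces A's per-car forward scan (re-scanning ahead up to each car's speed value) by a single backward sweep over the doubled index range that precomputes, for every cell, the cyclic distance to the next occupied cell; each car then becomes min(value, dist-1).
import Mathlib
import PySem

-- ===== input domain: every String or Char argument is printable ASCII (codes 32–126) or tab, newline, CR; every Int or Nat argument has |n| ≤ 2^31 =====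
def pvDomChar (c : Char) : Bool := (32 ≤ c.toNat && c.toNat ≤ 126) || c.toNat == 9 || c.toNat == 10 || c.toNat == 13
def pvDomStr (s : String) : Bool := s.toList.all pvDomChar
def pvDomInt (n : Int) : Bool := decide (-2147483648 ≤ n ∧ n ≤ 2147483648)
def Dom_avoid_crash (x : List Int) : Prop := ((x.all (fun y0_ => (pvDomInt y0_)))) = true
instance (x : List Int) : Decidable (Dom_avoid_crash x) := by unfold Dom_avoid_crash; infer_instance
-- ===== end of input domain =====

-- B replaces A's per-car forward scan by a single backward sweep that precomputes the
-- cyclic distance to the next occupied cell (alternative algorithm).  Python A and B both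
-- mutate x in place; the equivalence proved here is about the returned list's value.

-- ===== PORT A =====
-- inner 'for j in range(1, xv+1)' loop with its break, returning the final xv;
-- the range is consumed lazily: fuel = number of iterations left, j = current loop index
def avoidInner (y : List Int) (i : Nat) (xv : Int) : Nat → Int → Int
  | 0, _ => xv
  | fuel + 1, j =>
    if (i : Int) + j < (y.length : Int) then
      if PySem.List.pyGetD y ((i : Int) + j) 0 ≠ -1 then j - 1
      else avoidInner y i xv fuel (j + 1)
    else
      if PySem.List.pyGetD y ((i : Int) + j - (y.length : Int)) 0 ≠ -1 then j - 1
      else avoidInner y i xv fuel (j + 1)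

-- body of 'for i in range(len(x))'
def stepA (y : List Int) (i : Nat) : List Int :=
  let xi := PySem.List.pyGetD y (i : Int) 0
  if xi ≠ -1 then
    PySem.List.pySetD y (i : Int) (avoidInner y i xi xi.toNat 1)
  else y

def avoid_crash (x : List Int) : List Int :=
  (List.range x.length).foldl stepA x

-- ===== PORT B =====
-- 'for k in range(2*n-1, -1, -1)' building dist (cyclic distance to next occupied cell); c = None ↦ none
def distLoop (x : List Int) (ks : List Int) (dist : List Int) (c : Option Int) :
    List Int × Option Int :=
  match ks with
  | [] => (dist, c)
  | k :: rest =>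
      let i := PySem.Int.mod k (x.length : Int)
      let dist' := match c with
        | some v => PySem.List.pySetD dist i v
        | none => dist
      let c' := if PySem.List.pyGetD x i 0 ≠ -1 then some 1
                else match c with | none => none | some v => some (v + 1)
      distLoop x rest dist' c'

-- body of 'for i in range(n)': x[i] = min(x[i], dist[i] - 1) for occupied cells
def stepB (dist : List Int) (y : List Int) (i : Nat) : List Int :=
  let v := PySem.List.pyGetD y (i : Int) 0
  if v ≠ -1 then PySem.List.pySetD y (i : Int) (min v (PySem.List.pyGetD dist (i : Int) 0 - 1))
  else y

def avoid_crash_alt (x : List Int) : List Int :=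
  let dist := (distLoop x (PySem.List.pyRange (2 * (x.length : Int) - 1) (-1) (-1))
                 (List.replicate x.length 0) none).1
  (List.range x.length).foldl (stepB dist) x

-- ===== PRECONDITION & SPEC =====
def Spec_avoid_crash (x : List Int) (out : List Int) : Prop := out = avoid_crash_alt x
instance (x : List Int) (out : List Int) : Decidable (Spec_avoid_crash x out) := by unfold Spec_avoid_crash; infer_instance

-- ===== CLAIM (what is proved, stated in full; the proofs are below) =====
def Claim_equal_avoid_crash : Prop := ∀ (x : List Int), Dom_avoid_crash x → Spec_avoid_crash x (avoid_crash x)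

-- ===== LEMMAS AND PROOFS =====

-- distance to the next occupied cell strictly ahead (cyclically); 0 if none exists
def dNat (x : List Int) (i : Nat) : Nat :=
  if h : ∃ j, j < x.length + 1 ∧ 1 ≤ j ∧ x.getD ((i + j) % x.length) 0 ≠ -1 then Nat.find h
  else 0

-- the value every position i < x.length holds in the result
def targetVal (x : List Int) (i : Nat) : Int :=
  let v := x.getD i 0
  if v = -1 then v
  else if (dNat x i : Int) ≤ v then (dNat x i : Int) - 1 else v

lemma targetVal_of_empty (x : List Int) (i : Nat) (h : x.getD i 0 = -1) :
    targetVal x i = -1 := by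
  simp only [targetVal]
  rw [if_pos h, h]

lemma targetVal_of_occ (x : List Int) (i : Nat) (h : x.getD i 0 ≠ -1) :
    targetVal x i
      = if (dNat x i : Int) ≤ x.getD i 0 then (dNat x i : Int) - 1 else x.getD i 0 := by
  simp only [targetVal]
  rw [if_neg h]

lemma getD_set (xs : List Int) (m p : Nat) (v d : Int) :
    (xs.set m v).getD p d = if m = p ∧ m < xs.length then v else xs.getD p d := by
  rcases Nat.lt_or_ge p xs.length with hp | hp
  · rw [List.getD_eq_getElem _ _ (by simpa using hp), List.getD_eq_getElem _ _ hp,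
      List.getElem_set]
    split_ifs with h1 h2 h3 <;> simp_all
  · rw [List.getD_eq_default _ _ (by simpa using hp), List.getD_eq_default _ _ hp]
    split_ifs with h1
    · omega
    · rfl

lemma dNat_spec (x : List Int) (i : Nat) (hi : i < x.length) (hocc : x.getD i 0 ≠ -1) :
    1 ≤ dNat x i ∧ dNat x i ≤ x.length ∧
    x.getD ((i + dNat x i) % x.length) 0 ≠ -1 ∧
    (∀ j, 1 ≤ j → j < dNat x i → x.getD ((i + j) % x.length) 0 = -1) := by
  have hn : 1 ≤ x.length := by omega
  have hQ : ∃ j, j < x.length + 1 ∧ 1 ≤ j ∧ x.getD ((i + j) % x.length) 0 ≠ -1 := by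
    refine ⟨x.length, by omega, hn, ?_⟩
    rw [Nat.add_mod_right, Nat.mod_eq_of_lt hi]
    exact hocc
  have hd : dNat x i = Nat.find hQ := by unfold dNat; rw [dif_pos hQ]
  have hspec := Nat.find_spec hQ
  have hle : Nat.find hQ ≤ x.length := Nat.find_le ⟨by omega, hn, by
    rw [Nat.add_mod_right, Nat.mod_eq_of_lt hi]; exact hocc⟩
  refine ⟨by rw [hd]; exact hspec.2.1, by rw [hd]; exact hle, by rw [hd]; exact hspec.2.2, ?_⟩
  intro j h1 h2 
  rw [hd] at h2
  by_contra hne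
  exact Nat.find_min hQ h2 ⟨by omega, h1, hne⟩

lemma innerA_step (y : List Int) (i : Nat) (xv : Int) (d : Nat) (fuel : Nat)
    (hf : (fuel : Int) = max (xv + 1 - (d : Int)) 0)
    (hi : i < y.length) (_h1 : 1 ≤ d) (hdn : d ≤ y.length)
    (hoccd : y.getD ((i + d) % y.length) 0 ≠ -1) :
    avoidInner y i xv fuel ((d : Nat) : Int)
      = if (d : Int) ≤ xv then (d : Int) - 1 else xv := by
  have hmax1 : xv + 1 - (d : Int) ≤ max (xv + 1 - (d : Int)) 0 := le_max_left _ _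
  by_cases hle : (d : Int) ≤ xv
  · obtain ⟨f, rfl⟩ : ∃ f, fuel = f + 1 := by
      rcases fuel with _ | f
      · exfalso; simp only [Nat.cast_zero] at hf; omega
      · exact ⟨f, rfl⟩
    rw [avoidInner]
    by_cases hin : i + d < y.length
    · have hc : (i : Int) + (d : Int) < (y.length : Int) := by exact_mod_cast hin
      rw [if_pos hc]
      have hcast : (i : Int) + (d : Int) = ((i + d : Nat) : Int) := by push_cast; ring
      have hidx : PySem.List.pyGetD y ((i : Int) + (d : Int)) 0 = y.getD (i + d) 0 := by
        rw [hcast, PySem.List.pyGetD_natCast]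
      have hocc' : y.getD (i + d) 0 ≠ -1 := by
        rwa [Nat.mod_eq_of_lt hin] at hoccd
      rw [hidx, if_pos hocc', if_pos hle]
    · have hc : ¬ ((i : Int) + (d : Int) < (y.length : Int)) := by
        intro h; exact hin (by exact_mod_cast h)
      rw [if_neg hc]
      have hcast : (i : Int) + (d : Int) - (y.length : Int) = ((i + d - y.length : Nat) : Int) := by
        push_cast [Nat.cast_sub (by omega : y.length ≤ i + d)]; ring
      have hmod : (i + d) % y.length = i + d - y.length := by
        have h2 : i + d = (i + d - y.length) + y.length := by omega
        conv_lhs => rw [h2]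
        rw [Nat.add_mod_right, Nat.mod_eq_of_lt (by omega)]
      have hocc' : y.getD (i + d - y.length) 0 ≠ -1 := by rwa [hmod] at hoccd
      rw [hcast, PySem.List.pyGetD_natCast, if_pos hocc', if_pos hle]
  · have hmax : max (xv + 1 - (d : Int)) 0 = 0 := max_eq_right (by omega)
    obtain rfl : fuel = 0 := by
      rw [hmax] at hf
      exact_mod_cast hf
    rw [avoidInner, if_neg hle]

lemma innerA_eq (y : List Int) (i : Nat) (xv : Int) (d : Nat) :
    ∀ (fuel j0 : Nat), (fuel : Int) = max (xv + 1 - (j0 : Int)) 0 →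
    i < y.length → 1 ≤ j0 → j0 ≤ d → d ≤ y.length →
    y.getD ((i + d) % y.length) 0 ≠ -1 →
    (∀ j, j0 ≤ j → j < d → y.getD ((i + j) % y.length) 0 = -1) →
    avoidInner y i xv fuel ((j0 : Nat) : Int)
      = if (d : Int) ≤ xv then (d : Int) - 1 else xv := by
  intro fuel
  induction fuel with
  | zero =>
    intro j0 hf hi h1 hjd hdn hoccd hmin
    have hmax1 : xv + 1 - (j0 : Int) ≤ max (xv + 1 - (j0 : Int)) 0 := le_max_left _ _
    have hxv : xv < (j0 : Int) := by simp only [Nat.cast_zero] at hf; omega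
    have hjd2 : ((j0 : Nat) : Int) ≤ ((d : Nat) : Int) := by exact_mod_cast hjd
    rw [avoidInner, if_neg (by omega)]
  | succ fuel ih =>
    intro j0 hf hi h1 hjd hdn hoccd hmin
    have hmax1 : xv + 1 - (j0 : Int) ≤ max (xv + 1 - (j0 : Int)) 0 := le_max_left _ _
    have hj0xv : (j0 : Int) ≤ xv := by
      by_contra hcon
      have hmax : max (xv + 1 - (j0 : Int)) 0 = 0 := max_eq_right (by omega)
      rw [hmax] at hf
      push_cast at hf
      omega
    have hfeq : (fuel : Int) = xv + 1 - ((j0 : Int) + 1) := by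
      have h2 : max (xv + 1 - (j0 : Int)) 0 = xv + 1 - (j0 : Int) :=
        max_eq_left (by omega)
      rw [h2] at hf
      push_cast at hf
      omega
    by_cases hjd' : j0 = d
    · subst hjd'
      exact innerA_step y i xv j0 (fuel + 1) hf hi h1 hdn hoccd
    · have hjlt : j0 < d := by omega
      · have hstep : avoidInner y i xv (fuel + 1) ((j0 : Nat) : Int)
            = avoidInner y i xv fuel ((j0 + 1 : Nat) : Int) := by
          rw [avoidInner]
          have hempty := hmin j0 le_rfl hjlt
          by_cases hin : i + j0 < y.length
          · have hc : (i : Int) + (j0 : Int) < (y.length : Int) := by exact_mod_cast hin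
            rw [if_pos hc]
            have hcast : (i : Int) + (j0 : Int) = ((i + j0 : Nat) : Int) := by push_cast; ring
            rw [hcast, PySem.List.pyGetD_natCast]
            have he : y.getD (i + j0) 0 = -1 := by
              rwa [Nat.mod_eq_of_lt hin] at hempty
            rw [if_neg (by simp only [ne_eq, not_not]; simpa [List.getD] using he)]
            norm_cast
          · have hc : ¬ ((i : Int) + (j0 : Int) < (y.length : Int)) := by
              intro h; exact hin (by exact_mod_cast h)
            rw [if_neg hc]
            have hcast : (i : Int) + (j0 : Int) - (y.length : Int)
                = ((i + j0 - y.length : Nat) : Int) := by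
              push_cast [Nat.cast_sub (by omega : y.length ≤ i + j0)]; ring
            have hmod : (i + j0) % y.length = i + j0 - y.length := by
              have h2 : i + j0 = (i + j0 - y.length) + y.length := by omega
              conv_lhs => rw [h2]
              rw [Nat.add_mod_right, Nat.mod_eq_of_lt (by omega)]
            have he : y.getD (i + j0 - y.length) 0 = -1 := by rwa [hmod] at hempty
            rw [hcast, PySem.List.pyGetD_natCast, if_neg (by simp only [ne_eq, not_not]; simpa [List.getD] using he)]
            norm_cast
        rw [hstep]
        refine ih (j0 + 1) ?_ hi (by omega) (by omega) hdn hoccd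
          (fun j hj1 hj2 => hmin j (by omega) hj2)
        push_cast
        rw [max_eq_left (by omega)]
        push_cast at hfeq
        omega

-- invariant for B's counter c, entering the step that processes k = K - 1
def cInv (x : List Int) (K : Nat) (c : Option Int) : Prop :=
  match c with
  | none => ∀ m, K ≤ m → m < 2 * x.length → x.getD (m % x.length) 0 = -1
  | some v => ∃ m, K ≤ m ∧ m < 2 * x.length ∧ x.getD (m % x.length) 0 ≠ -1 ∧
      v = (m : Int) - (K : Int) + 1 ∧
      ∀ m', K ≤ m' → m' < m → x.getD (m' % x.length) 0 = -1

lemma distLoop_eq (x : List Int) :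
    ∀ (K : Nat) (dist : List Int) (c : Option Int), K ≤ 2 * x.length →
    dist.length = x.length →
    cInv x K c →
    (∀ i, i < x.length → K ≤ i → x.getD i 0 ≠ -1 → dist.getD i 0 = (dNat x i : Int)) →
    ∀ i, i < x.length → x.getD i 0 ≠ -1 →
      (distLoop x (PySem.List.pyRange ((K : Int) - 1) (-1) (-1)) dist c).1.getD i 0
        = (dNat x i : Int) := by
  intro K
  induction K with
  | zero =>
    intro dist c hK hlen hc ha i hi hocc
    rw [show ((0 : Nat) : Int) - 1 = (-1 : Int) by norm_num,
      PySem.List.pyRange_neg_one_eq_nil (by omega), distLoop]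
    exact ha i hi (by omega) hocc
  | succ K ih =>
    intro dist c hK hlen hc ha i hi hocc
    have hn : 1 ≤ x.length := by omega
    have hmlt : K % x.length < x.length := Nat.mod_lt _ (by omega)
    have hcast : ((K + 1 : Nat) : Int) - 1 = ((K : Nat) : Int) := by push_cast; ring
    rw [hcast, PySem.List.pyRange_neg_one_cons (by omega)]
    rcases c with _ | v
    · -- c = None entering this step
      simp only [cInv] at hc
      simp only [distLoop, PySem.Int.mod_natCast, PySem.List.pyGetD_natCast]
      have hanew : ∀ i', i' < x.length → K ≤ i' → x.getD i' 0 ≠ -1 →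
          dist.getD i' 0 = (dNat x i' : Int) := by
        intro i' hi' hKi' hocc'
        rcases Nat.lt_or_ge i' (K + 1) with h | h
        · -- i' = K, occupied, but c = none: impossible
          have hiK : i' = K := by omega
          exfalso
          have h1 : (K + x.length) % x.length = K % x.length := Nat.add_mod_right K x.length
          have h2 : K % x.length = K := Nat.mod_eq_of_lt (by omega)
          have := hc (K + x.length) (by omega) (by omega)
          rw [h1, h2] at this
          rw [hiK] at hocc'
          exact hocc' this
        · exact ha i' hi' h hocc'
      by_cases hKocc : x.getD (K % x.length) 0 = -1
      · rw [if_neg (by simpa using hKocc)]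
        refine ih dist none (by omega) hlen ?_ hanew i hi hocc
        simp only [cInv]
        intro m hm1 hm2
        rcases Nat.lt_or_ge m (K + 1) with h | h
        · have hmK : m = K := by omega
          rw [hmK]
          exact hKocc
        · exact hc m h hm2
      · rw [if_pos (by simpa using hKocc)]
        refine ih dist (some 1) (by omega) hlen ?_ hanew i hi hocc
        simp only [cInv]
        exact ⟨K, le_rfl, by omega, hKocc, by ring, fun m' h1 h2 => by omega⟩
    · -- c = some v entering this step
      simp only [cInv] at hc
      obtain ⟨mstar, hm1, hm2, hm3, hm4, hm5⟩ := hc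
      simp only [distLoop, PySem.Int.mod_natCast, PySem.List.pyGetD_natCast,
        PySem.List.pySetD_natCast]
      have hlen' : (dist.set (K % x.length) v).length = x.length := by
        rw [List.length_set]; exact hlen
      have hanew : ∀ i', i' < x.length → K ≤ i' → x.getD i' 0 ≠ -1 →
          (dist.set (K % x.length) v).getD i' 0 = (dNat x i' : Int) := by
        intro i' hi' hKi' hocc'
        rcases Nat.lt_or_ge i' (K + 1) with h | h
        · -- i' = K < x.length: the write this step is the final value of dist[K]
          have hiK : i' = K := by omega
          have hKlt : K < x.length := by omega
          have hKmod : K % x.length = K := Nat.mod_eq_of_lt hKlt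
          rw [hiK, getD_set, hKmod, if_pos ⟨rfl, by omega⟩]
          -- show v = dNat x K
          obtain ⟨hd1, hdn, hoccd, hmin⟩ := dNat_spec x K hKlt (by rwa [hiK] at hocc')
          have hjstar : 1 ≤ mstar - K := by omega
          have hdle : dNat x K ≤ mstar - K := by
            by_contra hcon
            have hlt2 : mstar - K < dNat x K := by omega
            have := hmin (mstar - K) hjstar hlt2
            rw [show K + (mstar - K) = mstar by omega] at this
            exact hm3 this
          have hdge : mstar - K ≤ dNat x K := by
            by_contra hcon
            have hlt2 : dNat x K < mstar - K := by omega
            have := hm5 (K + dNat x K) (by omega) (by omega)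
            exact hoccd this
          have hdeq : dNat x K = mstar - K := by omega
          rw [hdeq, hm4]
          push_cast [Nat.cast_sub (by omega : K ≤ mstar)]
          ring
        · -- i' > K: the write does not touch dist[i']
          have hne : K % x.length ≠ i' := by
            rcases Nat.lt_or_ge K x.length with hKlt | hKge
            · rw [Nat.mod_eq_of_lt hKlt]; omega
            · omega
          rw [getD_set, if_neg (by tauto)]
          exact ha i' hi' h hocc'
      by_cases hKocc : x.getD (K % x.length) 0 = -1
      · rw [if_neg (by simpa using hKocc)]
        refine ih _ (some (v + 1)) (by omega) hlen' ?_ hanew i hi hocc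
        simp only [cInv]
        refine ⟨mstar, by omega, hm2, hm3, by rw [hm4]; push_cast; ring, ?_⟩
        intro m' h1 h2
        rcases Nat.lt_or_ge m' (K + 1) with h | h
        · have hmK : m' = K := by omega
          rw [hmK]
          exact hKocc
        · exact hm5 m' h h2
      · rw [if_pos (by simpa using hKocc)]
        refine ih _ (some 1) (by omega) hlen' ?_ hanew i hi hocc
        simp only [cInv]
        exact ⟨K, le_rfl, by omega, hKocc, by ring, fun m' h1 h2 => by omega⟩

lemma A_loop (x : List Int) :
    ∀ (cnt m : Nat) (y : List Int), m + cnt = x.length →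
    y.length = x.length →
    (∀ p, p < x.length → (y.getD p 0 = -1 ↔ x.getD p 0 = -1)) →
    (∀ p, m ≤ p → y.getD p 0 = x.getD p 0) →
    (∀ p, p < m → y.getD p 0 = targetVal x p) →
    ((List.range' m cnt).foldl stepA y).length = x.length ∧
      ∀ p, p < x.length → ((List.range' m cnt).foldl stepA y).getD p 0 = targetVal x p := by
  intro cnt
  induction cnt with
  | zero =>
    intro m y hm hlen hiff hge hlt
    simp only [List.range'_zero, List.foldl_nil]
    exact ⟨hlen, fun p hp => hlt p (by omega)⟩
  | succ cnt ih =>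
    intro m y hm hlen hiff hge hlt
    rw [List.range'_succ, List.foldl_cons]
    have hmx : m < x.length := by omega
    have hym : PySem.List.pyGetD y (m : Int) 0 = y.getD m 0 := PySem.List.pyGetD_natCast y m 0
    have hyx : y.getD m 0 = x.getD m 0 := hge m le_rfl
    by_cases hocc : x.getD m 0 = -1
    · have hs : stepA y m = y := by
        unfold stepA
        simp only [hym, hyx, hocc, ne_eq, not_true_eq_false, if_false]
      rw [hs]
      refine ih (m + 1) y (by omega) hlen hiff (fun p hp => hge p (by omega)) ?_
      intro p hp
      rcases Nat.lt_or_ge p m with h | h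
      · exact hlt p h
      · have hpm : p = m := by omega
        rw [hpm, hyx, hocc, targetVal_of_empty x m hocc]
    · obtain ⟨hd1, hdn, hoccd, hmin⟩ := dNat_spec x m hmx hocc
      have hvne : (if (dNat x m : Int) ≤ x.getD m 0 then (dNat x m : Int) - 1 else x.getD m 0)
          ≠ -1 := by
        split_ifs with h
        · have : (1 : Int) ≤ (dNat x m : Int) := by exact_mod_cast hd1
          omega
        · exact hocc
      have hinner : avoidInner y m (x.getD m 0) (x.getD m 0).toNat 1
          = if (dNat x m : Int) ≤ x.getD m 0 then (dNat x m : Int) - 1 else x.getD m 0 := by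
        have h1 : ((1 : Nat) : Int) = (1 : Int) := by norm_cast
        rw [← h1]
        refine innerA_eq y m _ (dNat x m) (x.getD m 0).toNat 1 ?_ (by omega) (by omega)
          (by omega) (by omega) ?_ ?_
        · rw [Int.toNat_eq_max]
          norm_num
        · rw [hlen]
          intro hcon
          exact hoccd ((hiff _ (Nat.mod_lt _ (by omega))).mp hcon)
        · intro j hj1 hj2
          rw [hlen]
          exact (hiff _ (Nat.mod_lt _ (by omega))).mpr (hmin j hj1 hj2)
      have hs : stepA y m
          = y.set m (if (dNat x m : Int) ≤ x.getD m 0 then (dNat x m : Int) - 1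
              else x.getD m 0) := by
        unfold stepA
        simp only [hym, hyx]
        rw [if_pos hocc, hinner, PySem.List.pySetD_natCast]
      rw [hs]
      refine ih (m + 1) _ (by omega) (by rw [List.length_set]; exact hlen) ?_ ?_ ?_
      · intro p hp
        rw [getD_set]
        by_cases h : m = p ∧ m < y.length
        · rw [if_pos h, ← h.1]
          exact iff_of_false hvne hocc
        · rw [if_neg h]
          exact hiff p hp
      · intro p hp
        rw [getD_set, if_neg (by omega)]
        exact hge p (by omega)
      · intro p hp
        rcases Nat.lt_or_ge p m with h | h
        · rw [getD_set, if_neg (by omega)]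
          exact hlt p h
        · have hpm : p = m := by omega
          rw [hpm, getD_set, if_pos ⟨rfl, by omega⟩, targetVal_of_occ x m hocc]

lemma B_loop (x dist : List Int) :
    (∀ i, i < x.length → x.getD i 0 ≠ -1 → dist.getD i 0 = (dNat x i : Int)) →
    ∀ (cnt m : Nat) (y : List Int), m + cnt = x.length →
    y.length = x.length →
    (∀ p, m ≤ p → y.getD p 0 = x.getD p 0) →
    (∀ p, p < m → y.getD p 0 = targetVal x p) →
    ((List.range' m cnt).foldl (stepB dist) y).length = x.length ∧
      ∀ p, p < x.length → ((List.range' m cnt).foldl (stepB dist) y).getD p 0 = targetVal x p := by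
  intro hdist cnt
  induction cnt with
  | zero =>
    intro m y hm hlen hge hlt
    simp only [List.range'_zero, List.foldl_nil]
    exact ⟨hlen, fun p hp => hlt p (by omega)⟩
  | succ cnt ih =>
    intro m y hm hlen hge hlt
    rw [List.range'_succ, List.foldl_cons]
    have hmx : m < x.length := by omega
    have hym : PySem.List.pyGetD y (m : Int) 0 = y.getD m 0 := PySem.List.pyGetD_natCast y m 0
    have hyx : y.getD m 0 = x.getD m 0 := hge m le_rfl
    by_cases hocc : x.getD m 0 = -1
    · have hs : stepB dist y m = y := by
        unfold stepB
        simp only [hym, hyx, hocc, ne_eq, not_true_eq_false, if_false]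
      rw [hs]
      refine ih (m + 1) y (by omega) hlen (fun p hp => hge p (by omega)) ?_
      intro p hp
      rcases Nat.lt_or_ge p m with h | h
      · exact hlt p h
      · have hpm : p = m := by omega
        rw [hpm, hyx, hocc, targetVal_of_empty x m hocc]
    · obtain ⟨hd1, hdn, hoccd, hmin⟩ := dNat_spec x m hmx hocc
      have hdm : PySem.List.pyGetD dist (m : Int) 0 = (dNat x m : Int) := by
        rw [PySem.List.pyGetD_natCast]
        exact hdist m hmx hocc
      have hminval : min (x.getD m 0) ((dNat x m : Int) - 1)
          = if (dNat x m : Int) ≤ x.getD m 0 then (dNat x m : Int) - 1 else x.getD m 0 := by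
        rw [min_def]
        split_ifs with h1 h2 h3 <;> omega
      have hs : stepB dist y m
          = y.set m (if (dNat x m : Int) ≤ x.getD m 0 then (dNat x m : Int) - 1
              else x.getD m 0) := by
        unfold stepB
        simp only [hym, hyx, hdm]
        rw [if_pos hocc, hminval, PySem.List.pySetD_natCast]
      rw [hs]
      refine ih (m + 1) _ (by omega) (by rw [List.length_set]; exact hlen) ?_ ?_
      · intro p hp
        rw [getD_set, if_neg (by omega)]
        exact hge p (by omega)
      · intro p hp
        rcases Nat.lt_or_ge p m with h | h
        · rw [getD_set, if_neg (by omega)]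
          exact hlt p h
        · have hpm : p = m := by omega
          rw [hpm, getD_set, if_pos ⟨rfl, by omega⟩, targetVal_of_occ x m hocc]

lemma eq_of_pointwise (as bs : List Int) (h1 : as.length = bs.length)
    (h2 : ∀ p, p < as.length → as.getD p 0 = bs.getD p 0) : as = bs := by
  apply List.ext_getElem h1
  intro p hp hp'
  have := h2 p hp
  rwa [List.getD_eq_getElem _ _ hp, List.getD_eq_getElem _ _ hp'] at this

-- ===== VERDICT (by name: the statement is the Claim_ definition above) =====
theorem avoid_crash_spec : Claim_equal_avoid_crash := by
  unfold Claim_equal_avoid_crash Spec_avoid_crash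
  intro x _
  have hA := A_loop x x.length 0 x (by omega) rfl (fun p _ => Iff.rfl)
    (fun p _ => rfl) (fun p hp => absurd hp (by omega))
  have hdist : ∀ i, i < x.length → x.getD i 0 ≠ -1 →
      ((distLoop x (PySem.List.pyRange (2 * (x.length : Int) - 1) (-1) (-1))
          (List.replicate x.length 0) none).1).getD i 0 = (dNat x i : Int) := by
    intro i hi ho
    have hcast : (2 * (x.length : Int) - 1) = ((2 * x.length : Nat) : Int) - 1 := by
      push_cast; ring
    rw [hcast]
    refine distLoop_eq x (2 * x.length) _ none le_rfl (by simp) ?_ ?_ i hi ho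
    · simp only [cInv]
      intro m h1 h2
      omega
    · intro i' h1 h2 _
      exact absurd h2 (by omega)
  have hB := B_loop x _ hdist x.length 0 x (by omega) rfl
    (fun p _ => rfl) (fun p hp => absurd hp (by omega))
  show avoid_crash x = avoid_crash_alt x
  unfold avoid_crash avoid_crash_alt
  rw [List.range_eq_range']
  apply eq_of_pointwise
  · rw [hA.1, hB.1]
  · intro p hp
    rw [hA.1] at hp
    rw [hA.2 p hp, hB.2 p hp]
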